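-- pv_equiv track=rewrite | github.com/AdvaithAnand1/Project-Charge | initialprototype/settings.py | intConvert
-- ===== SOURCE A (Python) =====
-- def intConvert(wrongNumber):
--   tempList = list(wrongNumber)
--   counter = 0
--   for i in tempList:
--     counter = counter + 1
--   wrongNumber = ""
--   x = 0
--   while x < counter - 1:
--     wrongNumber += tempList[x]
--     x += 1
--   return(wrongNumber)
-- ===== SOURCE B (Python) =====
-- def intConvert(wrongNumber):
--   return "".join(list(wrongNumber)[:-1])
-- ===== Notes on version B (the rewrite author's own statement) =====
-- stated objective: simpler
-- what changed: Replaces the counting loop plus index-driven while loop that appends characters one by one with a single closed-form slice: join all elements except the last.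
import Mathlib
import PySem

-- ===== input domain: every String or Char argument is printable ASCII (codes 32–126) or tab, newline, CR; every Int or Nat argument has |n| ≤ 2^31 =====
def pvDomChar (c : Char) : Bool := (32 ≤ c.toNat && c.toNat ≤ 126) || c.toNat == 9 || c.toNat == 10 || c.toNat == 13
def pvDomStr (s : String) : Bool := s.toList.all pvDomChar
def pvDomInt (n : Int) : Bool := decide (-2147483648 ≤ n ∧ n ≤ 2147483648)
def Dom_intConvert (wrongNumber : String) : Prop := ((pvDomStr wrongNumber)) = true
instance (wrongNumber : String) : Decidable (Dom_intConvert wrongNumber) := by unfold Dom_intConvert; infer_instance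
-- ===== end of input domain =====

-- B replaces A's counting loop and index-driven while loop by a single closed-form slice-and-join (simpler).
-- ===== PORT A =====
-- the while loop: while x < counter - 1: wrongNumber += tempList[x]; x += 1
-- (the string being built is carried as its list of characters; String.mk at the end)
def intConvertLoop (tempList : List Char) (counter x : Int) (acc : List Char) : List Char :=
  if x < counter - 1 then
    match PySem.List.pyGet? tempList x with
    | some c => intConvertLoop tempList counter (x + 1) (acc ++ [c])
    | none => acc   -- IndexError: unreachable, x always in range
  else acc
termination_by (counter - x).toNat
decreasing_by omega

def intConvert (wrongNumber : String) : String :=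
  let tempList := wrongNumber.toList
  let counter := tempList.foldl (fun c _ => c + 1) (0 : Int)
  String.mk (intConvertLoop tempList counter 0 [])

-- ===== PORT B =====
-- "".join(list(wrongNumber)[:-1])
def intConvert_alt (wrongNumber : String) : String :=
  String.mk (PySem.List.slice wrongNumber.toList none (some (-1)))

-- ===== PRECONDITION & SPEC =====
def Spec_intConvert (wrongNumber : String) (out : String) : Prop := out = intConvert_alt wrongNumber
instance (wrongNumber : String) (out : String) : Decidable (Spec_intConvert wrongNumber out) := by unfold Spec_intConvert; infer_instance

-- ===== CLAIM (what is proved, stated in full; the proofs are below) =====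
def Claim_equal_intConvert : Prop := ∀ (wrongNumber : String), Dom_intConvert wrongNumber → Spec_intConvert wrongNumber (intConvert wrongNumber)

-- ===== LEMMAS AND PROOFS =====
lemma foldl_count (l : List Char) : ∀ (c : Int), l.foldl (fun c _ => c + 1) c = c + l.length := by
  induction l with
  | nil => simp
  | cons a t ih => intro c; simp [List.foldl, ih]; omega

lemma loop_eq (l : List Char) : ∀ (n x : Nat) (acc : List Char), n = l.length - x →
    intConvertLoop l (l.length : Int) (x : Int) acc = acc ++ (l.drop x).take (l.length - 1 - x) := by
  intro n
  induction n with
  | zero =>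
    intro x acc h
    rw [intConvertLoop]
    have hx : ¬ ((x : Int) < (l.length : Int) - 1) := by omega
    simp only [if_neg hx]
    have : l.length - 1 - x = 0 := by omega
    simp [this]
  | succ n ih =>
    intro x acc h
    rw [intConvertLoop]
    by_cases hx : (x : Int) < (l.length : Int) - 1
    · have hxl : x < l.length := by omega
      simp only [if_pos hx, PySem.List.pyGet?_natCast, List.getElem?_eq_getElem hxl]
      have hcast : (x : Int) + 1 = ((x + 1 : Nat) : Int) := by push_cast; ring
      rw [hcast, ih (x + 1) (acc ++ [l[x]]) (by omega)]
      have hk : l.length - 1 - x = (l.length - 1 - (x + 1)) + 1 := by omega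
      rw [List.drop_eq_getElem_cons hxl, hk, List.take_succ_cons]
      simp
    · simp only [if_neg hx]
      have : l.length - 1 - x = 0 := by omega
      simp [this]

-- ===== VERDICT (by name: the statement is the Claim_ definition above) =====
theorem intConvert_spec : Claim_equal_intConvert := by
  unfold Claim_equal_intConvert Spec_intConvert intConvert intConvert_alt
  intro w _
  dsimp only
  rw [foldl_count, PySem.List.slice_to_neg_one]
  have h0 : ((0 : Int) + (w.toList.length : Int)) = (w.toList.length : Int) := by ring
  rw [h0]
  have hl := loop_eq w.toList (w.toList.length) 0 [] (by omega)
  simp only [Nat.cast_zero, List.nil_append, List.drop_zero] at hl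
  rw [hl]
  simp [List.dropLast_eq_take]
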